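-- pv_equiv track=rewrite | github.com/yusiwen/myConfigs | ai/hermes/profiles/nuc12/skills/red-teaming/godmode/scripts/parseltongue.py | _apply_fullwidthmixed
-- ===== SOURCE A (Python) =====
-- def _apply_fullwidthmixed(word):
--     """FW MiX — fullwidth + mixed case alternating."""
--     result = []
--     for i, c in enumerate(word):
--         code = ord(c)
--         if i % 2 == 0 and 33 <= code <= 126:
--             result.append(chr(code + 0xFEE0))
--         else:
--             result.append(c.upper() if i % 2 else c)
--     return ''.join(result)
-- ===== SOURCE B (Python) =====
-- def _apply_fullwidthmixed(word):
--     """FW MiX — fullwidth + mixed case alternating (parity-partition version)."""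
--     fw = [chr(ord(c) + 0xFEE0) if 33 <= ord(c) <= 126 else c for c in word[::2]]
--     up = [c.upper() for c in word[1::2]]
--     parts = []
--     for e, o in zip(fw, up):
--         parts.append(e)
--         parts.append(o)
--     if len(up) < len(fw):
--         parts.append(fw[-1])
--     return ''.join(parts)
-- ===== Notes on version B (the rewrite author's own statement) =====
-- stated objective: alternative
-- what changed: Replaces the single enumerate loop with an index parity test by a parity partition: the even slice word[::2] is fullwidth-mapped, the odd slice word[1::2] is per-char uppercased, and the two sequences are interleaved positionally.
import Mathlib
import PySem

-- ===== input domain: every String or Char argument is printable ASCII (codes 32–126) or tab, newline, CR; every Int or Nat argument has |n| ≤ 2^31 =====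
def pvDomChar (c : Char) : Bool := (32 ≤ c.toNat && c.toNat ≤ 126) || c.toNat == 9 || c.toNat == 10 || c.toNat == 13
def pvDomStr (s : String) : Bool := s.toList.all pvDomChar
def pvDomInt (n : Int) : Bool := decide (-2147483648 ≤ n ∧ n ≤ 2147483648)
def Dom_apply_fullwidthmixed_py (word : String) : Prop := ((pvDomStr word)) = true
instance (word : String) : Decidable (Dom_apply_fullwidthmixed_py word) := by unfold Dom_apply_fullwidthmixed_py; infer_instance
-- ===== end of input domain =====

-- B replaces A's single indexed loop with a parity partition (fullwidth-map the even slice,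
-- uppercase the odd slice, interleave); an alternative decomposition, not claimed faster.

-- ===== PORT A =====
def apply_fullwidthmixed_py (word : String) : String :=
  let result := (PySem.List.enumerate word.toList 0).foldl (fun result ic =>
    let i := ic.1
    let c := ic.2
    let code := c.toNat
    if PySem.Int.mod i 2 = 0 ∧ 33 ≤ code ∧ code ≤ 126 then
      result ++ [Char.ofNat (code + 0xFEE0)]
    else
      result ++ [if PySem.Int.mod i 2 ≠ 0 then PySem.Chars.upperChar c else c]) []
  String.ofList result

-- ===== PORT B =====
-- fullwidth map for one character, as in Source B's comprehension over word[::2]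
def pvFw (c : Char) : Char :=
  if 33 ≤ c.toNat ∧ c.toNat ≤ 126 then Char.ofNat (c.toNat + 0xFEE0) else c

def apply_fullwidthmixed_py_alt (word : String) : String :=
  let fw := ((PySem.List.slice? word.toList none none 2).getD []).map pvFw
  let up := ((PySem.List.slice? word.toList (some 1) none 2).getD []).map PySem.Chars.upperChar
  let parts := (fw.zip up).foldl (fun acc eo => acc ++ [eo.1, eo.2]) ([] : List Char)
  let parts := if up.length < fw.length then parts ++ [fw.getLast!] else parts
  String.ofList parts

-- ===== PRECONDITION & SPEC =====
def Spec_apply_fullwidthmixed_py (word : String) (out : String) : Prop := out = apply_fullwidthmixed_py_alt word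
instance (word : String) (out : String) : Decidable (Spec_apply_fullwidthmixed_py word out) := by unfold Spec_apply_fullwidthmixed_py; infer_instance

-- ===== CLAIM (what is proved, stated in full; the proofs are below) =====
def Claim_equal_apply_fullwidthmixed_py : Prop := ∀ (word : String), Dom_apply_fullwidthmixed_py word → Spec_apply_fullwidthmixed_py word (apply_fullwidthmixed_py word)

-- ===== LEMMAS AND PROOFS =====

-- every-other-element of a list (what the slices word[::2] / word[1::2] yield)
def pvEvens {α : Type} : List α → List α
  | [] => []
  | [a] => [a]
  | a :: _ :: t => a :: pvEvens t

-- the common alternating result, two characters at a time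
def pvSpec : List Char → List Char
  | [] => []
  | [a] => [pvFw a]
  | a :: b :: t => pvFw a :: PySem.Chars.upperChar b :: pvSpec t

-- A's per-position element
def pvGA (ic : Int × Char) : Char :=
  if PySem.Int.mod ic.1 2 = 0 ∧ 33 ≤ ic.2.toNat ∧ ic.2.toNat ≤ 126 then
    Char.ofNat (ic.2.toNat + 0xFEE0)
  else if PySem.Int.mod ic.1 2 ≠ 0 then PySem.Chars.upperChar ic.2 else ic.2

theorem pvModNat (k : Nat) : PySem.Int.mod (k : Int) 2 = ((k % 2 : Nat) : Int) := by
  have h : ((k : Int)).fmod 2 = (k : Int) % 2 := by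
    rw [Int.fmod_eq_emod]
    norm_num
  simp only [PySem.Int.mod, h]
  omega

theorem pvGA_mod0 (i : Int) (c : Char) (h0 : PySem.Int.mod i 2 = 0) : pvGA (i, c) = pvFw c := by
  simp only [pvGA, pvFw, h0]
  simp

theorem pvGA_mod1 (i : Int) (c : Char) (h0 : PySem.Int.mod i 2 = 1) :
    pvGA (i, c) = PySem.Chars.upperChar c := by
  simp only [pvGA, h0]
  simp

theorem pvGA_even (k : Nat) (hk : k % 2 = 0) (c : Char) : pvGA ((k : Int), c) = pvFw c := by
  apply pvGA_mod0
  rw [pvModNat, hk]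
  try simp

theorem pvGA_odd (k : Nat) (hk : k % 2 = 1) (c : Char) :
    pvGA ((k : Int), c) = PySem.Chars.upperChar c := by
  apply pvGA_mod1
  rw [pvModNat, hk]
  try simp

theorem pvA_foldl (l : List Char) :
    (PySem.List.enumerate l 0).foldl (fun result ic =>
      let i := ic.1
      let c := ic.2
      let code := c.toNat
      if PySem.Int.mod i 2 = 0 ∧ 33 ≤ code ∧ code ≤ 126 then
        result ++ [Char.ofNat (code + 0xFEE0)]
      else
        result ++ [if PySem.Int.mod i 2 ≠ 0 then PySem.Chars.upperChar c else c]) []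
    = (PySem.List.enumerate l 0).map pvGA := by
  have hfun : (fun (result : List Char) (ic : Int × Char) =>
      let i := ic.1
      let c := ic.2
      let code := c.toNat
      if PySem.Int.mod i 2 = 0 ∧ 33 ≤ code ∧ code ≤ 126 then
        result ++ [Char.ofNat (code + 0xFEE0)]
      else
        result ++ [if PySem.Int.mod i 2 ≠ 0 then PySem.Chars.upperChar c else c])
      = (fun result ic => result ++ [pvGA ic]) := by
    funext result ic
    dsimp only
    by_cases h1 : PySem.Int.mod ic.1 2 = 0 ∧ 33 ≤ ic.2.toNat ∧ ic.2.toNat ≤ 126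
    · simp only [pvGA, if_pos h1]
    · simp only [pvGA, if_neg h1]
  rw [hfun, PySem.List.foldl_append_singleton_eq_map]
  simp

theorem pvA_map_spec (l : List Char) (s : Nat) :
    (PySem.List.enumerate l (2 * (s : Int))).map pvGA = pvSpec l := by
  induction l using pvSpec.induct generalizing s with
  | case1 => simp [PySem.List.enumerate_nil, pvSpec]
  | case2 a =>
      have h0 : (2 * (s : Int)) = ((2 * s : Nat) : Int) := by push_cast; ring
      simp only [PySem.List.enumerate_cons, PySem.List.enumerate_nil, List.map, pvSpec, h0]
      rw [pvGA_even (2 * s) (by omega)]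
  | case3 a b t ih =>
      have h0 : (2 * (s : Int)) = ((2 * s : Nat) : Int) := by push_cast; ring
      have h1 : (2 * (s : Int)) + 1 = ((2 * s + 1 : Nat) : Int) := by push_cast; ring
      have h2 : (2 * (s : Int)) + 1 + 1 = 2 * ((s + 1 : Nat) : Int) := by push_cast; ring
      simp only [PySem.List.enumerate_cons, List.map, pvSpec]
      rw [h2, ih (s + 1), h1, pvGA_odd (2 * s + 1) (by omega), h0,
        pvGA_even (2 * s) (by omega)]

-- the clean core of a step-2 slice: indices 0,2,4,…
theorem pvFilterMap_two {α : Type} (l : List α) :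
    List.filterMap (fun k => l[2 * k]?) (List.range ((l.length + 1) / 2)) = pvEvens l := by
  induction l using pvEvens.induct with
  | case1 => simp [pvEvens]
  | case2 a => simp [pvEvens]
  | case3 a b t ih =>
      have hc : ((a :: b :: t).length + 1) / 2 = (t.length + 1) / 2 + 1 := by
        simp [List.length_cons]; omega
      rw [hc, List.range_succ_eq_map, List.filterMap_cons, List.filterMap_map]
      have hf : ((fun k => (a :: b :: t)[2 * k]?) ∘ Nat.succ) = (fun k => t[2 * k]?) := by
        funext k
        have : 2 * Nat.succ k = 2 * k + 1 + 1 := by omega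
        simp [Function.comp, this]
      simp only [hf, ih]
      simp [pvEvens]

theorem pvSlice_even {α : Type} (l : List α) :
    PySem.List.slice? l none none 2 = some (pvEvens l) := by
  simp only [PySem.List.slice?, PySem.List.sliceIndices]
  norm_num
  refine Eq.trans ?_ (pvFilterMap_two l)
  rw [show (if 0 < l.length then (((l.length : Int) + 2 - 1) / 2).toNat else 0)
      = (l.length + 1) / 2 from by split <;> omega]
  congr 1

theorem pvSlice_odd {α : Type} (l : List α) :
    PySem.List.slice? l (some 1) none 2 = some (pvEvens l.tail) := by
  cases l with
  | nil => simp [PySem.List.slice?, PySem.List.sliceIndices, pvEvens]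
  | cons a t =>
      simp only [PySem.List.slice?, PySem.List.sliceIndices, List.tail_cons]
      norm_num
      refine Eq.trans ?_ (pvFilterMap_two t)
      rw [show (if 0 < t.length then (((t.length : Int) + 2 - 1) / 2).toNat else 0)
          = (t.length + 1) / 2 from by split <;> omega]
      congr 1
      funext k
      rw [show ((1 : Int) + 2 * (k : Int)).toNat = 2 * k + 1 from by omega]
      simp

theorem pvB_spec (l : List Char) :
    (let fw := (pvEvens l).map pvFw
     let up := (pvEvens l.tail).map PySem.Chars.upperChar
     let parts := (fw.zip up).foldl (fun acc eo => acc ++ [eo.1, eo.2]) ([] : List Char)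
     if up.length < fw.length then parts ++ [fw.getLast!] else parts) = pvSpec l := by
  induction l using pvSpec.induct with
  | case1 => simp [pvEvens, pvSpec]
  | case2 a => simp [pvEvens, pvSpec]
  | case3 a b t ih =>
      have hev : pvEvens (b :: t) = b :: pvEvens t.tail := by
        cases t <;> simp [pvEvens]
      have hshift : ∀ (zs : List (Char × Char)) (x y : Char),
          zs.foldl (fun acc eo => acc ++ [eo.1, eo.2]) ([] ++ [x, y])
          = [x, y] ++ zs.foldl (fun acc eo => acc ++ [eo.1, eo.2]) [] := by
        have hgen : ∀ (zs : List (Char × Char)) (acc : List Char),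
            zs.foldl (fun acc eo => acc ++ [eo.1, eo.2]) acc
            = acc ++ zs.foldl (fun acc eo => acc ++ [eo.1, eo.2]) [] := by
          intro zs
          induction zs with
          | nil => simp
          | cons z zs ihz =>
              intro acc
              rw [List.foldl_cons, ihz, List.foldl_cons, ihz ([] ++ [z.1, z.2])]
              simp
        intro zs x y
        rw [hgen]
        simp
      simp only [pvEvens, List.tail_cons, hev, List.map_cons, List.zip_cons_cons,
        List.foldl_cons, pvSpec, hshift, List.length_cons, Nat.add_lt_add_iff_right]
      by_cases hlen : ((pvEvens t.tail).map PySem.Chars.upperChar).length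
          < ((pvEvens t).map pvFw).length
      · have hlast : ∀ (l : List Char), l ≠ [] → (pvFw a :: l).getLast! = l.getLast! := by
          intro l hl
          cases l with
          | nil => exact absurd rfl hl
          | cons y ys =>
              rw [List.getLast!_eq_getLast?_getD, List.getLast!_eq_getLast?_getD,
                List.getLast?_cons_cons]
        have hne : ((pvEvens t).map pvFw) ≠ [] := by
          intro h
          rw [h] at hlen
          simp at hlen
        rw [if_pos hlen] at *
        rw [hlast _ hne, List.append_assoc, ih]
        simp
      · rw [if_neg hlen] at *
        rw [ih]
        simp

-- ===== VERDICT (by name: the statement is the Claim_ definition above) =====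
theorem apply_fullwidthmixed_py_spec : Claim_equal_apply_fullwidthmixed_py := by
  intro word _
  unfold Spec_apply_fullwidthmixed_py apply_fullwidthmixed_py apply_fullwidthmixed_py_alt
  rw [pvA_foldl, pvSlice_even, pvSlice_odd]
  simp only [Option.getD_some]
  have h0 : (0 : Int) = 2 * ((0 : Nat) : Int) := by norm_num
  rw [h0, pvA_map_spec word.toList 0, ← pvB_spec word.toList]
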